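-- pv_equiv track=rewrite | github.com/xiaohai-huang/cab420-workspace | work/search-engine-technology/week6/wk6_index_solutions.py | doc_at_a_time
-- ===== SOURCE A (Python) =====
-- def doc_at_a_time(I, Q):  # index I is a Dirctionary of term:Directionary of (itemId:freq)
--     L={}    # L is the selected inverted list
--     R={}    # R is a directionary of docId:relevance
--     for list in I.items():
--         for id in list[1].items(): # get all document IDs with value 0
--             R[id[0]]=0
--         if (list[0] in Q):     # select inverted lists based on the query
--                 L[list[0]]= I[list[0]]
--     for (d, sd) in R.items():
--         for (term, f) in L.items():
--             if (d in f):
--                 sd = sd + f[d]*Q[term]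
--         R[d] = sd
--     return R
-- ===== SOURCE B (Python) =====
-- def doc_at_a_time(I, Q):
--     # Term-at-a-time scoring: zero every document once, then accumulate
--     # each query term's postings directly into R (no L dict, no docs x terms scan).
--     R = {}
--     for postings in I.values():
--         for d in postings:
--             R[d] = 0
--     for term, postings in I.items():
--         if term in Q:
--             w = Q[term]
--             for d, f in postings.items():
--                 R[d] = R.get(d, 0) + f * w
--     return R
-- ===== Notes on version B (the rewrite author's own statement) =====
-- stated objective: faster
-- what changed: B drops A's intermediate L dict and its D x |L| doc-at-a-time rescoring loop with per-term membership tests, and instead accumulates each selected term's postings directly into the score table (term-at-a-time), touching only the postings of query terms; Pre_ excludes association lists with a repeated key on I or on a postings list, which do not encode any Python dict (a Python dict literal silently collapses such duplicates).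
import Mathlib
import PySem

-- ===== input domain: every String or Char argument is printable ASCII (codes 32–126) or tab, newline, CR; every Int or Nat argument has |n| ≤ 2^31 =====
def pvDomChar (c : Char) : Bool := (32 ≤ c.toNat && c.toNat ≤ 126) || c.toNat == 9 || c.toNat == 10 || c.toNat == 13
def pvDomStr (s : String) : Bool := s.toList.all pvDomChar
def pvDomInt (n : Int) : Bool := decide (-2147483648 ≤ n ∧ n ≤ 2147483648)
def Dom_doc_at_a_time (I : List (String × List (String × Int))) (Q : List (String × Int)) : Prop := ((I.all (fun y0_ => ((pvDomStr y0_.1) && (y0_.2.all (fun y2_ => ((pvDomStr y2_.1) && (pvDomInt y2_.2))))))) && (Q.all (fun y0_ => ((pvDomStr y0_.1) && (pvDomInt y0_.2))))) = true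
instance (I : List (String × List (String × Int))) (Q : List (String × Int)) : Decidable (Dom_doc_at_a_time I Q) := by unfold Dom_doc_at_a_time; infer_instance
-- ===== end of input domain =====

-- B replaces A's L dict and its docs × selected-terms rescoring scan (a membership test and
-- lookup per doc/term pair) by a single term-at-a-time accumulation over the query terms'
-- postings only (objective: faster, asymptotically on the doc × term rescoring phase).

-- ===== PORT A =====
-- (the Python body computes the R-update and then the L-update in each iteration; the two
--  touch different dicts, so the pair below lists the L component first, same values)
def doc_at_a_time (I : List (String × List (String × Int))) (Q : List (String × Int)) : List (String × Int) :=
  let Qd : PySem.Dict String Int := PySem.Dict.mk Q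
  let Id : PySem.Dict String (List (String × Int)) := PySem.Dict.mk I
  let LR := I.foldl (fun (LR : PySem.Dict String (List (String × Int)) × PySem.Dict String Int) lst =>
      (if Qd.contains lst.1 then LR.1.insert lst.1 (Id.getD lst.1 []) else LR.1,
       lst.2.foldl (fun R idp => R.insert idp.1 (0 : Int)) LR.2))
    (PySem.Dict.empty, PySem.Dict.empty)
  let R2 := LR.2.items.foldl (fun (R : PySem.Dict String Int) ds =>
      R.insert ds.1 (LR.1.items.foldl (fun sd tf =>
          if (PySem.Dict.mk tf.2).contains ds.1 then
            sd + (PySem.Dict.mk tf.2).getD ds.1 0 * Qd.getD tf.1 0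
          else sd) ds.2)) LR.2
  R2.items

-- ===== PORT B =====
def doc_at_a_time_alt (I : List (String × List (String × Int))) (Q : List (String × Int)) : List (String × Int) :=
  let Qd : PySem.Dict String Int := PySem.Dict.mk Q
  let R0 := I.foldl (fun (R : PySem.Dict String Int) lst =>
      lst.2.foldl (fun R dp => R.insert dp.1 (0 : Int)) R) PySem.Dict.empty
  let R := I.foldl (fun (R : PySem.Dict String Int) lst =>
      if Qd.contains lst.1 then
        lst.2.foldl (fun R dp => R.insert dp.1 (R.getD dp.1 0 + dp.2 * Qd.getD lst.1 0)) R
      else R) R0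
  R.items

-- ===== PRECONDITION & SPEC =====
-- Pre_ excludes association lists carrying a repeated key on I or on one of its postings
-- lists: such lists do not encode any Python dict (dict construction collapses duplicates),
-- and A's single dict entry and B's per-occurrence accumulation disagree on them.
def Pre_doc_at_a_time (I : List (String × List (String × Int))) (Q : List (String × Int)) : Prop :=
  (I.map Prod.fst).Nodup ∧ ∀ p ∈ I, (p.2.map Prod.fst).Nodup
instance (I : List (String × List (String × Int))) (Q : List (String × Int)) : Decidable (Pre_doc_at_a_time I Q) := by unfold Pre_doc_at_a_time; infer_instance

def pvWitness_doc_at_a_time : (List (String × List (String × Int))) × (List (String × Int)) :=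
  ([("t", [("a", 2), ("b", 1)]), ("u", [("b", 5)])], [("t", 3), ("u", 1)])

def Spec_doc_at_a_time (I : List (String × List (String × Int))) (Q : List (String × Int)) (out : List (String × Int)) : Prop := out = doc_at_a_time_alt I Q
instance (I : List (String × List (String × Int))) (Q : List (String × Int)) (out : List (String × Int)) : Decidable (Spec_doc_at_a_time I Q out) := by unfold Spec_doc_at_a_time; infer_instance

-- ===== CLAIM (what is proved, stated in full; the proofs are below) =====
def Claim_equal_doc_at_a_time : Prop := ∀ (I : List (String × List (String × Int))) (Q : List (String × Int)), Dom_doc_at_a_time I Q → Pre_doc_at_a_time I Q → Spec_doc_at_a_time I Q (doc_at_a_time I Q)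

-- ===== LEMMAS AND PROOFS =====

-- total weight the update stream `ups` adds to key k
def pvSumAt (ups : List (String × Int)) (k : String) : Int :=
  ((ups.filter (fun p => p.1 == k)).map (·.2)).sum

-- the flattened update stream of B's accumulation phase
def pvUpd (I : List (String × List (String × Int))) (Q : List (String × Int)) : List (String × Int) :=
  I.flatMap (fun lst =>
    if (PySem.Dict.mk Q).contains lst.1 then
      lst.2.map (fun dp => (dp.1, dp.2 * (PySem.Dict.mk Q).getD lst.1 0))
    else [])

theorem pvSumAt_nil (k : String) : pvSumAt [] k = 0 := rfl

theorem pvSumAt_cons (p : String × Int) (ups : List (String × Int)) (k : String) :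
    pvSumAt (p :: ups) k = (if p.1 == k then p.2 else 0) + pvSumAt ups k := by
  by_cases h : p.1 == k <;> simp [pvSumAt, h]

theorem pvSumAt_append (a b : List (String × Int)) (k : String) :
    pvSumAt (a ++ b) k = pvSumAt a k + pvSumAt b k := by
  simp [pvSumAt, List.filter_append]

theorem pvSumAt_eq_zero_of_not_mem (ups : List (String × Int)) (k : String)
    (h : k ∉ ups.map Prod.fst) : pvSumAt ups k = 0 := by
  induction ups with
  | nil => rfl
  | cons p rest ih =>
      simp only [List.map_cons, List.mem_cons, not_or] at h
      rw [pvSumAt_cons, ih h.2, if_neg (by simpa using Ne.symm h.1)]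
      ring

-- keys only grow through the zeroing inner loop
theorem mem_keys_zero_inner (pl : List (String × Int)) (R : PySem.Dict String Int) (k : String)
    (h : k ∈ R.keys ∨ k ∈ pl.map Prod.fst) :
    k ∈ (pl.foldl (fun R dp => R.insert dp.1 (0 : Int)) R).keys := by
  induction pl generalizing R with
  | nil => simpa using h.resolve_right (by simp)
  | cons dp rest ih =>
      simp only [List.foldl_cons]
      apply ih
      rcases h with h | h
      · exact Or.inl (by simp [PySem.Dict.mem_keys_insert, h])
      · simp only [List.map_cons, List.mem_cons] at h
        rcases h with h | h
        · exact Or.inl (by simp [PySem.Dict.mem_keys_insert, h])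
        · exact Or.inr h

theorem nodup_keys_zero_inner (pl : List (String × Int)) (R : PySem.Dict String Int)
    (h : R.keys.Nodup) : (pl.foldl (fun R dp => R.insert dp.1 (0 : Int)) R).keys.Nodup := by
  induction pl generalizing R with
  | nil => exact h
  | cons dp rest ih => exact ih _ (PySem.Dict.nodup_keys_insert _ _ _ h)

theorem mem_keys_zero_outer (I : List (String × List (String × Int))) (R : PySem.Dict String Int)
    (k : String)
    (h : k ∈ R.keys ∨ ∃ lst ∈ I, k ∈ lst.2.map Prod.fst) :
    k ∈ (I.foldl (fun (R : PySem.Dict String Int) lst =>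
        lst.2.foldl (fun R dp => R.insert dp.1 (0 : Int)) R) R).keys := by
  induction I generalizing R with
  | nil => simpa using h.resolve_right (by simp)
  | cons lst rest ih =>
      simp only [List.foldl_cons]
      apply ih
      rcases h with h | ⟨l, hl, hk⟩
      · exact Or.inl (mem_keys_zero_inner _ _ _ (Or.inl h))
      · rcases List.mem_cons.1 hl with rfl | hl
        · exact Or.inl (mem_keys_zero_inner _ _ _ (Or.inr hk))
        · exact Or.inr ⟨l, hl, hk⟩

theorem nodup_keys_zero_outer (I : List (String × List (String × Int))) (R : PySem.Dict String Int)
    (h : R.keys.Nodup) :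
    (I.foldl (fun (R : PySem.Dict String Int) lst =>
        lst.2.foldl (fun R dp => R.insert dp.1 (0 : Int)) R) R).keys.Nodup := by
  induction I generalizing R with
  | nil => exact h
  | cons lst rest ih => exact ih _ (nodup_keys_zero_inner _ _ h)

theorem map_replace_of_not_mem {α : Type} (l : List (String × α)) (k : String) (x : String × α)
    (h : k ∉ l.map Prod.fst) :
    l.map (fun p => if p.1 == k then x else p) = l := by
  conv_rhs => rw [← List.map_id l]
  apply List.map_congr_left
  intro p hp
  have : p.1 ≠ k := fun he => h (he ▸ List.mem_map_of_mem hp)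
  simp [this]

-- A's rescoring loop: overwriting every key of a duplicate-free dict in order is a map over its items
theorem foldl_insert_over_self (g : String → Int → Int) :
    ∀ (post pre : List (String × Int)), ((pre ++ post).map Prod.fst).Nodup →
    (post.foldl (fun (R : PySem.Dict String Int) ds => R.insert ds.1 (g ds.1 ds.2))
        (PySem.Dict.mk (pre ++ post))).items
      = pre ++ post.map (fun ds => (ds.1, g ds.1 ds.2)) := by
  intro post
  induction post with
  | nil => intro pre h; simp
  | cons ds rest ih =>
      intro pre h
      have hk : ds.1 ∈ (PySem.Dict.mk (pre ++ ds :: rest)).keys := by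
        simp [PySem.Dict.keys]
      have hc : (PySem.Dict.mk (pre ++ ds :: rest)).contains ds.1 = true :=
        (PySem.Dict.contains_iff_mem_keys _ _).2 hk
      have hnd2 : (pre.map Prod.fst ++ ds.1 :: rest.map Prod.fst).Nodup := by simpa using h
      obtain ⟨h1, h2, hdisj⟩ := List.nodup_append.1 hnd2
      have hpre : ds.1 ∉ pre.map Prod.fst := fun hm => hdisj ds.1 hm ds.1 (by simp) rfl
      have hrest : ds.1 ∉ rest.map Prod.fst := (List.nodup_cons.1 h2).1
      have hstep : (PySem.Dict.mk (pre ++ ds :: rest)).insert ds.1 (g ds.1 ds.2)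
          = PySem.Dict.mk ((pre ++ [(ds.1, g ds.1 ds.2)]) ++ rest) := by
        apply PySem.Dict.ext
        rw [PySem.Dict.items_insert_of_contains _ _ hc]
        show (pre ++ ds :: rest).map (fun p => if p.1 == ds.1 then (ds.1, g ds.1 ds.2) else p) = _
        rw [List.map_append, List.map_cons, map_replace_of_not_mem _ _ _ hpre,
            map_replace_of_not_mem _ _ _ hrest]
        simp
      have hnd3 : (((pre ++ [(ds.1, g ds.1 ds.2)]) ++ rest).map Prod.fst).Nodup := by
        simpa using h
      calc (List.foldl (fun (R : PySem.Dict String Int) ds => R.insert ds.1 (g ds.1 ds.2))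
              (PySem.Dict.mk (pre ++ ds :: rest)) (ds :: rest)).items
            = (List.foldl (fun (R : PySem.Dict String Int) ds => R.insert ds.1 (g ds.1 ds.2))
              (PySem.Dict.mk ((pre ++ [(ds.1, g ds.1 ds.2)]) ++ rest)) rest).items := by
              rw [List.foldl_cons, hstep]
        _ = (pre ++ [(ds.1, g ds.1 ds.2)]) ++ rest.map (fun ds => (ds.1, g ds.1 ds.2)) :=
              ih _ hnd3
        _ = pre ++ (ds :: rest).map (fun ds => (ds.1, g ds.1 ds.2)) := by simp

-- B's accumulation: adding a stream of updates to existing keys adds the per-key totals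
theorem foldl_addUpd (ups : List (String × Int)) :
    ∀ (R : PySem.Dict String Int), R.keys.Nodup → (∀ p ∈ ups, R.contains p.1 = true) →
    (ups.foldl (fun (R : PySem.Dict String Int) p => R.insert p.1 (R.getD p.1 0 + p.2)) R).items
      = R.items.map (fun q => (q.1, q.2 + pvSumAt ups q.1)) := by
  induction ups with
  | nil =>
      intro R _ _
      simp [pvSumAt_nil]
  | cons p rest ih =>
      intro R hnd hmem
      have hc : R.contains p.1 = true := hmem p (by simp)
      have hkeys : (R.insert p.1 (R.getD p.1 0 + p.2)).keys = R.keys :=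
        PySem.Dict.keys_insert_of_contains _ _ hc
      rw [List.foldl_cons,
          ih _ (by rw [hkeys]; exact hnd)
            (fun q hq => (PySem.Dict.contains_iff_mem_keys _ _).2 (by
              rw [hkeys]
              exact (PySem.Dict.contains_iff_mem_keys _ _).1 (hmem q (List.mem_cons_of_mem _ hq)))),
          PySem.Dict.items_insert_of_contains _ _ hc, List.map_map]
      apply List.map_congr_left
      intro q hq
      by_cases hqp : q.1 = p.1
      · have hget : R.getD q.1 0 = q.2 :=
          PySem.Dict.getD_of_mem_items R (by simpa using hq) hnd 0
        have hget' : R.getD p.1 0 = q.2 := hqp ▸ hget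
        simp only [Function.comp_apply]
        rw [if_pos (by simp [hqp]), pvSumAt_cons, if_pos (by simp [hqp.symm])]
        rw [hqp, hget', add_assoc]
      · simp only [Function.comp_apply]
        rw [if_neg (by simp [hqp]), pvSumAt_cons, if_neg (by simp [Ne.symm hqp]), zero_add]

-- B's nested accumulation loop is the single fold of its flattened update stream
theorem B_flatten (Q : List (String × Int)) :
    ∀ (I : List (String × List (String × Int))) (R : PySem.Dict String Int),
    I.foldl (fun (R : PySem.Dict String Int) lst =>
      if (PySem.Dict.mk Q).contains lst.1 then
        lst.2.foldl (fun R dp =>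
          R.insert dp.1 (R.getD dp.1 0 + dp.2 * (PySem.Dict.mk Q).getD lst.1 0)) R
      else R) R
    = (pvUpd I Q).foldl (fun (R : PySem.Dict String Int) p =>
        R.insert p.1 (R.getD p.1 0 + p.2)) R := by
  intro I
  induction I with
  | nil => intro R; rfl
  | cons lst rest ih =>
      intro R
      rw [List.foldl_cons]
      show _ = ((if (PySem.Dict.mk Q).contains lst.1 then
            lst.2.map (fun dp => (dp.1, dp.2 * (PySem.Dict.mk Q).getD lst.1 0))
          else []) ++ pvUpd rest Q).foldl _ R
      rw [List.foldl_append]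
      by_cases hc : (PySem.Dict.mk Q).contains lst.1
      · rw [if_pos hc, if_pos hc, List.foldl_map, ih]
      · rw [if_neg hc, if_neg hc, List.foldl_nil, ih]

-- A's L dict: items are the query-selected entries of I, in I's order
theorem L_items (Q : List (String × Int)) (f : String → List (String × Int)) :
    ∀ (l : List (String × List (String × Int)))
      (acc : PySem.Dict String (List (String × Int))),
    (∀ p ∈ l, acc.contains p.1 = false) → (l.map Prod.fst).Nodup →
    (l.foldl (fun (L : PySem.Dict String (List (String × Int))) lst =>
        if (PySem.Dict.mk Q).contains lst.1 then L.insert lst.1 (f lst.1) else L) acc).items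
      = acc.items ++ (l.filter (fun p => (PySem.Dict.mk Q).contains p.1)).map
          (fun p => (p.1, f p.1)) := by
  intro l
  induction l with
  | nil => intro acc _ _; simp
  | cons lst rest ih =>
      intro acc hfree hnd
      have hnd' := hnd
      simp only [List.map_cons, List.nodup_cons] at hnd'
      have hfree' : ∀ (v : List (String × Int)), ∀ p ∈ rest,
          (acc.insert lst.1 v).contains p.1 = false := by
        intro v p hp
        rw [PySem.Dict.contains_insert]
        have : p.1 ≠ lst.1 := fun he => hnd'.1 (he ▸ List.mem_map_of_mem hp)
        simp [this, hfree p (List.mem_cons_of_mem _ hp)]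
      rw [List.foldl_cons]
      by_cases hc : (PySem.Dict.mk Q).contains lst.1
      · rw [if_pos hc, ih _ (hfree' _) hnd'.2,
            PySem.Dict.items_insert_of_not_contains _ _ (hfree lst (by simp)),
            List.filter_cons_of_pos (p := fun p => (PySem.Dict.mk Q).contains p.1)
              (l := rest) hc, List.map_cons]
        simp
      · rw [if_neg hc, ih _ (fun p hp => hfree p (List.mem_cons_of_mem _ hp)) hnd'.2,
            List.filter_cons_of_neg (p := fun p => (PySem.Dict.mk Q).contains p.1)
              (l := rest) (by simpa using hc)]

-- a conditional-accumulate fold is the start value plus a sum of conditional contributions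
theorem foldl_if_add {α : Type} (c : α → Bool) (h : α → Int) (l : List α) :
    ∀ (s : Int), l.foldl (fun sd x => if c x then sd + h x else sd) s
      = s + (l.map (fun x => if c x then h x else 0)).sum := by
  induction l with
  | nil => intro s; simp
  | cons x rest ih =>
      intro s
      rw [List.foldl_cons]
      by_cases hc : c x
      · rw [if_pos hc, ih]; simp [hc]; ring
      · rw [if_neg hc, ih]; simp [hc]

-- a filtered sum is the sum of conditional contributions
theorem sum_filter_ite {α : Type} (qc : α → Bool) (g : α → Int) (l : List α) :
    ((l.filter qc).map g).sum = (l.map (fun x => if qc x then g x else 0)).sum := by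
  induction l with
  | nil => rfl
  | cons x rest ih =>
      by_cases h : qc x
      · rw [List.filter_cons_of_pos h, List.map_cons, List.sum_cons, ih,
            List.map_cons, List.sum_cons, if_pos h]
      · rw [List.filter_cons_of_neg (by simpa using h), ih, List.map_cons, List.sum_cons,
            if_neg h, zero_add]

-- per-postings-list total added to doc d, against A's membership test + lookup
theorem score_entry (pl : List (String × Int)) (d : String) (w : Int)
    (hnd : (pl.map Prod.fst).Nodup) :
    pvSumAt (pl.map (fun dp => (dp.1, dp.2 * w))) d
      = if (PySem.Dict.mk pl).contains d then (PySem.Dict.mk pl).getD d 0 * w else 0 := by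
  induction pl with
  | nil => simp [pvSumAt_nil]
  | cons dp rest ih =>
      have hnd' := hnd
      simp only [List.map_cons, List.nodup_cons] at hnd'
      rw [List.map_cons, pvSumAt_cons]
      by_cases he : dp.1 = d
      · have hz : pvSumAt (rest.map (fun dp => (dp.1, dp.2 * w))) d = 0 := by
          apply pvSumAt_eq_zero_of_not_mem
          intro hmem
          obtain ⟨q, hq, hEq⟩ := List.mem_map.1 hmem
          obtain ⟨dp', hdp', rfl⟩ := List.mem_map.1 hq
          exact hnd'.1 (by rw [he, ← hEq]; exact (List.mem_map_of_mem (f := Prod.fst) hdp' : dp'.1 ∈ rest.map Prod.fst))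
        rw [hz, if_pos (by simp [he])]
        have hcon : (PySem.Dict.mk (dp :: rest)).contains d = true := by
          rw [PySem.Dict.contains_eq_isSome_get?, PySem.Dict.get?_mk_cons, if_pos (by simp [he])]
          rfl
        have hget : (PySem.Dict.mk (dp :: rest)).getD d 0 = dp.2 := by
          rw [PySem.Dict.getD_eq_get?_getD, PySem.Dict.get?_mk_cons, if_pos (by simp [he])]
          rfl
        rw [if_pos hcon, hget]
        ring
      · rw [if_neg (by simp [he]), zero_add, ih hnd'.2]
        have hcon : (PySem.Dict.mk (dp :: rest)).contains d = (PySem.Dict.mk rest).contains d := by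
          rw [PySem.Dict.contains_eq_isSome_get?, PySem.Dict.contains_eq_isSome_get?,
              PySem.Dict.get?_mk_cons, if_neg (by simp [he])]
        have hget : (PySem.Dict.mk (dp :: rest)).getD d 0 = (PySem.Dict.mk rest).getD d 0 := by
          rw [PySem.Dict.getD_eq_get?_getD, PySem.Dict.get?_mk_cons, if_neg (by simp [he]),
              ← PySem.Dict.getD_eq_get?_getD]
        rw [hcon, hget]

-- the per-key total of B's flattened update stream, per entry of I
theorem pvSumAt_pvUpd (I : List (String × List (String × Int))) (Q : List (String × Int))
    (d : String) (hpl : ∀ p ∈ I, (p.2.map Prod.fst).Nodup) :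
    pvSumAt (pvUpd I Q) d
      = (I.map (fun lst => if (PySem.Dict.mk Q).contains lst.1 then
          (if (PySem.Dict.mk lst.2).contains d then
            (PySem.Dict.mk lst.2).getD d 0 * (PySem.Dict.mk Q).getD lst.1 0 else 0)
          else 0)).sum := by
  induction I with
  | nil => rfl
  | cons lst rest ih =>
      have hstep : pvUpd (lst :: rest) Q
          = (if (PySem.Dict.mk Q).contains lst.1 then
              lst.2.map (fun dp => (dp.1, dp.2 * (PySem.Dict.mk Q).getD lst.1 0))
            else []) ++ pvUpd rest Q := rfl
      rw [hstep, pvSumAt_append, List.map_cons, List.sum_cons,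
          ih (fun p hp => hpl p (List.mem_cons_of_mem _ hp))]
      by_cases hc : (PySem.Dict.mk Q).contains lst.1
      · rw [if_pos hc, if_pos hc, score_entry _ _ _ (hpl lst (by simp))]
      · rw [if_neg hc, if_neg hc, pvSumAt_nil]

-- ===== VERDICT (by name: the statement is the Claim_ definition above) =====
theorem doc_at_a_time_spec : Claim_equal_doc_at_a_time := by
  intro I Q _ hPre
  obtain ⟨hI, hpl⟩ := hPre
  unfold Spec_doc_at_a_time
  simp only [doc_at_a_time, doc_at_a_time_alt]
  set Qd : PySem.Dict String Int := PySem.Dict.mk Q with hQd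
  set R0 : PySem.Dict String Int := I.foldl (fun (R : PySem.Dict String Int) lst =>
      lst.2.foldl (fun R dp => R.insert dp.1 (0 : Int)) R) PySem.Dict.empty with hR0
  set L0 : PySem.Dict String (List (String × Int)) := I.foldl
      (fun (L : PySem.Dict String (List (String × Int))) lst =>
        if Qd.contains lst.1 then L.insert lst.1 ((PySem.Dict.mk I).getD lst.1 []) else L)
      PySem.Dict.empty with hL0
  have hsplit : (List.foldl
      (fun (LR : PySem.Dict String (List (String × Int)) × PySem.Dict String Int) lst =>
        (if Qd.contains lst.1 then LR.1.insert lst.1 ((PySem.Dict.mk I).getD lst.1 []) else LR.1,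
         lst.2.foldl (fun R idp => R.insert idp.1 (0 : Int)) LR.2))
      (PySem.Dict.empty, PySem.Dict.empty) I) = (L0, R0) := by
    rw [hL0, hR0]
    exact PySem.List.foldl_prod_mk
      (fun (L : PySem.Dict String (List (String × Int))) lst =>
        if Qd.contains lst.1 then L.insert lst.1 ((PySem.Dict.mk I).getD lst.1 []) else L)
      (fun (R : PySem.Dict String Int) lst =>
        List.foldl (fun R idp => R.insert idp.1 (0 : Int)) R lst.2)
      I PySem.Dict.empty PySem.Dict.empty
  rw [hsplit]
  have hR0nd : R0.keys.Nodup := nodup_keys_zero_outer I _ (by simp)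
  have hR0items : (R0.items.map Prod.fst).Nodup := hR0nd
  have hcont : ∀ p ∈ pvUpd I Q, R0.contains p.1 = true := by
    intro p hp
    unfold pvUpd at hp
    rw [List.mem_flatMap] at hp
    obtain ⟨lst, hlst, hp2⟩ := hp
    by_cases hc : (PySem.Dict.mk Q).contains lst.1
    · rw [if_pos hc] at hp2
      rw [List.mem_map] at hp2
      obtain ⟨dp, hdp, rfl⟩ := hp2
      exact (PySem.Dict.contains_iff_mem_keys _ _).2
        (mem_keys_zero_outer I _ _ (Or.inr ⟨lst, hlst,
          (List.mem_map_of_mem (f := Prod.fst) hdp : dp.1 ∈ lst.2.map Prod.fst)⟩))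
    · rw [if_neg hc] at hp2
      cases hp2
  have hLfold := L_items Q (fun t => (PySem.Dict.mk I).getD t []) I PySem.Dict.empty
      (fun p _ => by simp) hI
  have hL : L0.items = I.filter (fun p => Qd.contains p.1) := by
    refine hLfold.trans ?_
    show [] ++ (I.filter (fun p => Qd.contains p.1)).map
        (fun p => (p.1, (PySem.Dict.mk I).getD p.1 [])) = _
    rw [List.nil_append]
    have hid : ∀ p ∈ I.filter (fun p => Qd.contains p.1),
        ((p.1 : String), (PySem.Dict.mk I).getD p.1 [])
          = (fun (p : String × List (String × Int)) => p) p := by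
      intro p hp
      have hpI : p ∈ I := List.mem_of_mem_filter hp
      have hgd : (PySem.Dict.mk I).getD p.1 [] = p.2 :=
        PySem.Dict.getD_of_mem_items _ (by simpa using hpI) hI []
      simp [hgd]
    exact (List.map_congr_left hid).trans (List.map_id' _)
  have hg : ∀ (k : String) (s : Int),
      List.foldl (fun sd (tf : String × List (String × Int)) =>
          if (PySem.Dict.mk tf.2).contains k then
            sd + (PySem.Dict.mk tf.2).getD k 0 * Qd.getD tf.1 0 else sd) s L0.items
        = s + pvSumAt (pvUpd I Q) k := by
    intro k s
    rw [hL]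
    refine (foldl_if_add (fun (tf : String × List (String × Int)) => (PySem.Dict.mk tf.2).contains k)
        (fun (tf : String × List (String × Int)) =>
          (PySem.Dict.mk tf.2).getD k 0 * Qd.getD tf.1 0) _ s).trans ?_
    refine congrArg (s + ·) ?_
    rw [pvSumAt_pvUpd I Q k hpl]
    exact sum_filter_ite (fun (p : String × List (String × Int)) => Qd.contains p.1) _ I
  have hA := foldl_insert_over_self
      (fun k s => List.foldl (fun sd (tf : String × List (String × Int)) =>
          if (PySem.Dict.mk tf.2).contains k then
            sd + (PySem.Dict.mk tf.2).getD k 0 * Qd.getD tf.1 0 else sd) s L0.items)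
      R0.items [] (by simpa using hR0items)
  have hB := (congrArg PySem.Dict.items (B_flatten Q I R0)).trans
      (foldl_addUpd (pvUpd I Q) R0 hR0nd hcont)
  have hmid : R0.items.map (fun ds => ((ds.1 : String),
      List.foldl (fun sd (tf : String × List (String × Int)) =>
          if (PySem.Dict.mk tf.2).contains ds.1 then
            sd + (PySem.Dict.mk tf.2).getD ds.1 0 * Qd.getD tf.1 0 else sd) ds.2 L0.items))
      = R0.items.map (fun q => (q.1, q.2 + pvSumAt (pvUpd I Q) q.1)) :=
    List.map_congr_left (fun q _ => by rw [hg q.1 q.2])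
  exact (hA.trans hmid).trans (Eq.symm hB)
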